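-- pv_equiv track=rewrite | github.com/StuartMcClintock/wikipedia-census-cyrus | scripts/move_heading_links_to_text.py | _replace_first_outside_markup
-- ===== SOURCE A (Python) =====
-- from typing import Dict, List, Optional, Tuple
--
-- def _replace_first_outside_markup(text: str, needle: str, replacement: str) -> Tuple[str, bool]:
--     if not needle:
--         return text, False
--     n = len(text)
--     m = len(needle)
--     i = 0
--     depth_link = 0
--     depth_template = 0
--     in_ref = False
--     in_comment = False
--
--     while i <= n - m:
--         if text.startswith("<!--", i):
--             end = text.find("-->", i + 4)
--             if end == -1:
--                 return text, False
--             i = end + 3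
--             continue
--         if text.startswith("<ref", i):
--             end_tag = text.find(">", i + 4)
--             if end_tag == -1:
--                 return text, False
--             if text[end_tag - 1] == "/":
--                 i = end_tag + 1
--                 continue
--             end_ref = text.find("</ref>", end_tag + 1)
--             if end_ref == -1:
--                 return text, False
--             i = end_ref + 6
--             continue
--
--         two = text[i:i + 2]
--         if two == "[[":
--             depth_link += 1
--             i += 2
--             continue
--         if two == "]]":
--             depth_link = max(0, depth_link - 1)
--             i += 2
--             continue
--         if two == "{{":
--             depth_template += 1
--             i += 2
--             continue
--         if two == "}}":
--             depth_template = max(0, depth_template - 1)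
--             i += 2
--             continue
--
--         if depth_link == 0 and depth_template == 0:
--             if text.startswith(needle, i):
--                 before_ok = i == 0 or not text[i - 1].isalnum()
--                 after_ok = i + m >= n or not text[i + m].isalnum()
--                 if before_ok and after_ok:
--                     return text[:i] + replacement + text[i + m:], True
--         i += 1
--     return text, False
-- ===== SOURCE B (Python) =====
-- from typing import Tuple
--
-- def _replace_first_outside_markup(text: str, needle: str, replacement: str) -> Tuple[str, bool]:
--     # Three-stage decomposition: (1) a depth-free tokenizer turns the text into a
--     # token stream (bracket open/close events and plain-character positions,
--     # stopping at unterminated markup); (2) a fold over the tokens computes the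
--     # clamped depths and keeps the depth-0 positions; (3) the first kept position
--     # passing the needle/word-boundary test wins.
--     if not needle:
--         return text, False
--     n = len(text)
--     m = len(needle)
--     # stage 1: tokenize (no depth state at all)
--     toks = []
--     i = 0
--     while i <= n - m:
--         if text.startswith("<!--", i):
--             end = text.find("-->", i + 4)
--             if end == -1:
--                 break
--             i = end + 3
--         elif text.startswith("<ref", i):
--             end_tag = text.find(">", i + 4)
--             if end_tag == -1:
--                 break
--             if text[end_tag - 1] == "/":
--                 i = end_tag + 1
--             else:
--                 end_ref = text.find("</ref>", end_tag + 1)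
--                 if end_ref == -1:
--                     break
--                 i = end_ref + 6
--         else:
--             two = text[i:i + 2]
--             if two == "[[":
--                 toks.append(("L", True))
--                 i += 2
--             elif two == "]]":
--                 toks.append(("L", False))
--                 i += 2
--             elif two == "{{":
--                 toks.append(("T", True))
--                 i += 2
--             elif two == "}}":
--                 toks.append(("T", False))
--                 i += 2
--             else:
--                 toks.append(("C", i))
--                 i += 1
--     # stage 2: depth fold -> candidate positions
--     candidates = []
--     dl = 0
--     dt = 0
--     for kind, v in toks:
--         if kind == "L":
--             dl = dl + 1 if v else max(0, dl - 1)
--         elif kind == "T":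
--             dt = dt + 1 if v else max(0, dt - 1)
--         elif dl == 0 and dt == 0:
--             candidates.append(v)
--     # stage 3: match
--     for i in candidates:
--         if text.startswith(needle, i) \
--                 and (i == 0 or not text[i - 1].isalnum()) \
--                 and (i + m >= n or not text[i + m].isalnum()):
--             return text[:i] + replacement + text[i + m:], True
--     return text, False
-- ===== Notes on version B (the rewrite author's own statement) =====
-- stated objective: alternative
-- what changed: A's single loop that tracks depth and matches the needle inline is split into a three-stage pipeline: a depth-free tokenizer turning the text into a stream of bracket events and plain-character positions, a fold over the tokens computing clamped depths and keeping the depth-0 positions, and a separate match pass over those positions.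
import Mathlib
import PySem

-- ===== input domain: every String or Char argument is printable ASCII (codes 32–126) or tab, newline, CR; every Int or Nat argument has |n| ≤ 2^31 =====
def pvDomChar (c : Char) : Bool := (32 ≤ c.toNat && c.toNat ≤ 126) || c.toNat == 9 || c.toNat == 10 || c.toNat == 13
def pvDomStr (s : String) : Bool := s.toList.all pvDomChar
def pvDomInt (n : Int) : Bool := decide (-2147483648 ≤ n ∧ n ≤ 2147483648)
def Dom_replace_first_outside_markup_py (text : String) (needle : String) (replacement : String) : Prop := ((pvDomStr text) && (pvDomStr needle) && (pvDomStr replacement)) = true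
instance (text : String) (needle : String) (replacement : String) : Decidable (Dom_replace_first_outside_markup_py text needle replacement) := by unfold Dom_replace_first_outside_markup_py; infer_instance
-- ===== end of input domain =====

-- B re-decomposes A's single matching loop into three stages: a depth-free tokenizer,
-- a depth fold selecting depth-0 positions, and a match pass; equal return values.

-- ===== PORT A =====
-- A's while-loop; i strictly increases each iteration, so fuel = n+1 never runs out.
def pvLoopA (cs nd rp : List Char) (n m : Nat) : Nat → Nat → Int → Int → List Char × Bool
  | 0, _, _, _ => (cs, false)
  | fuel + 1, i, dl, dt =>
    if i + m ≤ n then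
      if PySem.Chars.startswith (cs.drop i) "<!--".toList then
        let e := PySem.Chars.findFrom cs "-->".toList ((i : Int) + 4) none
        if e = -1 then (cs, false) else pvLoopA cs nd rp n m fuel (e + 3).toNat dl dt
      else if PySem.Chars.startswith (cs.drop i) "<ref".toList then
        let et := PySem.Chars.findFrom cs ">".toList ((i : Int) + 4) none
        if et = -1 then (cs, false)
        else if PySem.List.pyGet? cs (et - 1) = some '/' then
          pvLoopA cs nd rp n m fuel (et + 1).toNat dl dt
        else
          let er := PySem.Chars.findFrom cs "</ref>".toList (et + 1) none
          if er = -1 then (cs, false) else pvLoopA cs nd rp n m fuel (er + 6).toNat dl dt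
      else
        let two := PySem.List.slice cs (some (i : Int)) (some ((i : Int) + 2))
        if two = "[[".toList then pvLoopA cs nd rp n m fuel (i + 2) (dl + 1) dt
        else if two = "]]".toList then pvLoopA cs nd rp n m fuel (i + 2) (max 0 (dl - 1)) dt
        else if two = "{{".toList then pvLoopA cs nd rp n m fuel (i + 2) dl (dt + 1)
        else if two = "}}".toList then pvLoopA cs nd rp n m fuel (i + 2) dl (max 0 (dt - 1))
        else if dl = 0 ∧ dt = 0 then
          if PySem.Chars.startswith (cs.drop i) nd then
            let before_ok := decide (i = 0) || !(PySem.Chars.isalnum (PySem.List.pyGetD cs ((i : Int) - 1) ' '))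
            let after_ok := decide (n ≤ i + m) || !(PySem.Chars.isalnum (PySem.List.pyGetD cs ((i : Int) + (m : Int)) ' '))
            if before_ok && after_ok then (cs.take i ++ rp ++ cs.drop (i + m), true)
            else pvLoopA cs nd rp n m fuel (i + 1) dl dt
          else pvLoopA cs nd rp n m fuel (i + 1) dl dt
        else pvLoopA cs nd rp n m fuel (i + 1) dl dt
    else (cs, false)

def replace_first_outside_markup_py (text : String) (needle : String) (replacement : String) : String × Bool :=
  let cs := text.toList
  let nd := needle.toList
  if nd = [] then (text, false)
  else
    let r := pvLoopA cs nd replacement.toList cs.length nd.length (cs.length + 1) 0 0 0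
    (String.ofList r.1, r.2)

-- ===== PORT B =====
-- stage 1 output: bracket open/close events and plain-character positions.
inductive PvTok where
  | link : Bool → PvTok
  | tmpl : Bool → PvTok
  | chr : Nat → PvTok
deriving DecidableEq, Repr

-- stage 1: tokenizer — no depth state, no needle; stops at unterminated markup.
def pvTokenize (cs : List Char) (n m : Nat) : Nat → Nat → List PvTok
  | 0, _ => []
  | fuel + 1, i =>
    if i + m ≤ n then
      if PySem.Chars.startswith (cs.drop i) "<!--".toList then
        let e := PySem.Chars.findFrom cs "-->".toList ((i : Int) + 4) none
        if e = -1 then [] else pvTokenize cs n m fuel (e + 3).toNat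
      else if PySem.Chars.startswith (cs.drop i) "<ref".toList then
        let et := PySem.Chars.findFrom cs ">".toList ((i : Int) + 4) none
        if et = -1 then []
        else if PySem.List.pyGet? cs (et - 1) = some '/' then
          pvTokenize cs n m fuel (et + 1).toNat
        else
          let er := PySem.Chars.findFrom cs "</ref>".toList (et + 1) none
          if er = -1 then [] else pvTokenize cs n m fuel (er + 6).toNat
      else
        let two := PySem.List.slice cs (some (i : Int)) (some ((i : Int) + 2))
        if two = "[[".toList then .link true :: pvTokenize cs n m fuel (i + 2)
        else if two = "]]".toList then .link false :: pvTokenize cs n m fuel (i + 2)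
        else if two = "{{".toList then .tmpl true :: pvTokenize cs n m fuel (i + 2)
        else if two = "}}".toList then .tmpl false :: pvTokenize cs n m fuel (i + 2)
        else .chr i :: pvTokenize cs n m fuel (i + 1)
    else []

-- stage 2: fold the clamped depths over the tokens, keeping depth-0 positions.
def pvDepthFold : List PvTok → Int → Int → List Nat
  | [], _, _ => []
  | .link b :: r, dl, dt => pvDepthFold r (if b then dl + 1 else max 0 (dl - 1)) dt
  | .tmpl b :: r, dl, dt => pvDepthFold r dl (if b then dt + 1 else max 0 (dt - 1))
  | .chr i :: r, dl, dt =>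
      if dl = 0 ∧ dt = 0 then i :: pvDepthFold r dl dt else pvDepthFold r dl dt

-- stage 3: first candidate passing the needle match and boundary checks wins.
def pvMatch (cs nd rp : List Char) (n m : Nat) : List Nat → List Char × Bool
  | [] => (cs, false)
  | i :: rest =>
    if PySem.Chars.startswith (cs.drop i) nd then
      let before_ok := decide (i = 0) || !(PySem.Chars.isalnum (PySem.List.pyGetD cs ((i : Int) - 1) ' '))
      let after_ok := decide (n ≤ i + m) || !(PySem.Chars.isalnum (PySem.List.pyGetD cs ((i : Int) + (m : Int)) ' '))
      if before_ok && after_ok then (cs.take i ++ rp ++ cs.drop (i + m), true)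
      else pvMatch cs nd rp n m rest
    else pvMatch cs nd rp n m rest

def replace_first_outside_markup_py_alt (text : String) (needle : String) (replacement : String) : String × Bool :=
  let cs := text.toList
  let nd := needle.toList
  if nd = [] then (text, false)
  else
    let toks := pvTokenize cs cs.length nd.length (cs.length + 1) 0
    let cands := pvDepthFold toks 0 0
    let r := pvMatch cs nd replacement.toList cs.length nd.length cands
    (String.ofList r.1, r.2)

-- ===== PRECONDITION & SPEC =====
def Spec_replace_first_outside_markup_py (text : String) (needle : String) (replacement : String) (out : String × Bool) : Prop := out = replace_first_outside_markup_py_alt text needle replacement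
instance (text : String) (needle : String) (replacement : String) (out : String × Bool) : Decidable (Spec_replace_first_outside_markup_py text needle replacement out) := by unfold Spec_replace_first_outside_markup_py; infer_instance

-- ===== CLAIM (what is proved, stated in full; the proofs are below) =====
def Claim_equal_replace_first_outside_markup_py : Prop := ∀ (text : String) (needle : String) (replacement : String), Dom_replace_first_outside_markup_py text needle replacement → Spec_replace_first_outside_markup_py text needle replacement (replace_first_outside_markup_py text needle replacement)

-- ===== LEMMAS AND PROOFS =====

-- A's inline matching loop equals B's tokenize-then-depth-fold-then-match pipeline.
theorem pvLoopA_eq (cs nd rp : List Char) (n m : Nat) :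
    ∀ (fuel i : Nat) (dl dt : Int),
      pvLoopA cs nd rp n m fuel i dl dt =
        pvMatch cs nd rp n m (pvDepthFold (pvTokenize cs n m fuel i) dl dt) := by
  intro fuel
  induction fuel with
  | zero => intro i dl dt; rfl
  | succ fuel ih =>
    intro i dl dt
    simp only [pvLoopA, pvTokenize]
    by_cases hb : i + m ≤ n
    · rw [if_pos hb, if_pos hb]
      by_cases hc : PySem.Chars.startswith (List.drop i cs) "<!--".toList = true
      · rw [if_pos hc, if_pos hc]
        by_cases he : PySem.Chars.findFrom cs "-->".toList ((i : Int) + 4) none = -1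
        · rw [if_pos he, if_pos he]; rfl
        · rw [if_neg he, if_neg he]; exact ih _ _ _
      · rw [if_neg hc, if_neg hc]
        by_cases hr : PySem.Chars.startswith (List.drop i cs) "<ref".toList = true
        · rw [if_pos hr, if_pos hr]
          by_cases het : PySem.Chars.findFrom cs ">".toList ((i : Int) + 4) none = -1
          · rw [if_pos het, if_pos het]; rfl
          · rw [if_neg het, if_neg het]
            by_cases hsl : PySem.List.pyGet? cs (PySem.Chars.findFrom cs ">".toList ((i : Int) + 4) none - 1) = some '/'
            · rw [if_pos hsl, if_pos hsl]; exact ih _ _ _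
            · rw [if_neg hsl, if_neg hsl]
              by_cases her : PySem.Chars.findFrom cs "</ref>".toList (PySem.Chars.findFrom cs ">".toList ((i : Int) + 4) none + 1) none = -1
              · rw [if_pos her, if_pos her]; rfl
              · rw [if_neg her, if_neg her]; exact ih _ _ _
        · rw [if_neg hr, if_neg hr]
          by_cases hbr1 : PySem.List.slice cs (some (i : Int)) (some ((i : Int) + 2)) = "[[".toList
          · rw [if_pos hbr1, if_pos hbr1]; simp only [pvDepthFold]
            rw [ih]; simp
          · rw [if_neg hbr1, if_neg hbr1]
            by_cases hbr2 : PySem.List.slice cs (some (i : Int)) (some ((i : Int) + 2)) = "]]".toList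
            · rw [if_pos hbr2, if_pos hbr2]; simp only [pvDepthFold]
              rw [ih]; simp
            · rw [if_neg hbr2, if_neg hbr2]
              by_cases hbr3 : PySem.List.slice cs (some (i : Int)) (some ((i : Int) + 2)) = "{{".toList
              · rw [if_pos hbr3, if_pos hbr3]; simp only [pvDepthFold]
                rw [ih]; simp
              · rw [if_neg hbr3, if_neg hbr3]
                by_cases hbr4 : PySem.List.slice cs (some (i : Int)) (some ((i : Int) + 2)) = "}}".toList
                · rw [if_pos hbr4, if_pos hbr4]; simp only [pvDepthFold]
                  rw [ih]; simp
                · rw [if_neg hbr4, if_neg hbr4]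
                  simp only [pvDepthFold]
                  by_cases hd : dl = 0 ∧ dt = 0
                  · rw [if_pos hd, if_pos hd]
                    by_cases hs : PySem.Chars.startswith (List.drop i cs) nd = true
                    · rw [if_pos hs]
                      simp only [pvMatch]
                      rw [if_pos hs]
                      by_cases hba : ((decide (i = 0) || !PySem.Chars.isalnum (PySem.List.pyGetD cs ((i : Int) - 1) ' ')) && (decide (n ≤ i + m) || !PySem.Chars.isalnum (PySem.List.pyGetD cs ((i : Int) + (m : Int)) ' '))) = true
                      · rw [if_pos hba, if_pos hba]
                      · rw [if_neg hba, if_neg hba]; exact ih _ _ _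
                    · rw [if_neg hs]
                      simp only [pvMatch]
                      rw [if_neg hs]
                      exact ih _ _ _
                  · rw [if_neg hd, if_neg hd]; exact ih _ _ _
    · rw [if_neg hb, if_neg hb]; rfl

-- ===== VERDICT (by name: the statement is the Claim_ definition above) =====
theorem replace_first_outside_markup_py_spec : Claim_equal_replace_first_outside_markup_py := by
  intro text needle replacement _
  unfold Spec_replace_first_outside_markup_py
  unfold replace_first_outside_markup_py replace_first_outside_markup_py_alt
  by_cases h : needle.toList = [] <;> simp [h, pvLoopA_eq]
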